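-- pv_equiv track=rewrite | github.com/vdrey/Project-Euler | Python/Problem 5/5v1.py | factorCheck
-- ===== SOURCE A (Python) =====
-- def factorCheck(num):
--
--     factorList = [11,12,13,14,15,16,17,18,19,20]
--     score = 0
--
--     for term in factorList:
--
--         if num % term == 0:
--             score = score + 1
--
--         else:
--             break
--
--     if score == 10:
--         return True
--
--     else:
--         return False
-- ===== SOURCE B (Python) =====
-- def factorCheck(num):
--     # divisible by all of 11..20  <=>  divisible by lcm(11..20) = 232792560
--     return num % 232792560 == 0
-- ===== Notes on version B (the rewrite author's own statement) =====
-- stated objective: simpler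
-- what changed: Replaces the ten-iteration loop with break and score counter by a single closed-form modulo test against 232792560 = lcm(11..20).
import Mathlib
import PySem

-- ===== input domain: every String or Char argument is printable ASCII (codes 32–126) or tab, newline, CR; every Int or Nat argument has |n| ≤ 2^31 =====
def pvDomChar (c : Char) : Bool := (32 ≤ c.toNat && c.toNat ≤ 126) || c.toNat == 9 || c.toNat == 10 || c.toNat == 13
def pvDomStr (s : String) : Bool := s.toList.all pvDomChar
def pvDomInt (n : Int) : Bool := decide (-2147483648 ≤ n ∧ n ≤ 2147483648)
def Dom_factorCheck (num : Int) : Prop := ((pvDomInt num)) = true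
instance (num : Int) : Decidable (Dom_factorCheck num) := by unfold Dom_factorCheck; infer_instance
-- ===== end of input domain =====

-- B replaces A's ten-step loop by one modulo test against lcm(11..20); simpler closed form.


-- ===== PORT A =====
-- loop over factorList with break: stops incrementing score at the first non-divisor
def factorCheckLoop (num : Int) : List Int → Int → Int
  | [], score => score
  | t :: ts, score =>
    if PySem.Int.mod num t = 0 then factorCheckLoop num ts (score + 1) else score

def factorCheck (num : Int) : Bool :=
  let score := factorCheckLoop num [11, 12, 13, 14, 15, 16, 17, 18, 19, 20] 0
  if score = 10 then true else false

-- ===== PORT B =====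
-- B: one closed-form test against lcm(11..20) = 232792560
def factorCheck_alt (num : Int) : Bool :=
  PySem.Int.mod num 232792560 = 0

-- ===== PRECONDITION & SPEC =====
def Spec_factorCheck (num : Int) (out : Bool) : Prop := out = factorCheck_alt num
instance (num : Int) (out : Bool) : Decidable (Spec_factorCheck num out) := by unfold Spec_factorCheck; infer_instance

-- ===== CLAIM (what is proved, stated in full; the proofs are below) =====
def Claim_equal_factorCheck : Prop := ∀ (num : Int), Dom_factorCheck num → Spec_factorCheck num (factorCheck num)

-- ===== LEMMAS AND PROOFS =====

set_option maxHeartbeats 2000000 in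
-- characterisation of A's loop: true iff every listed factor divides num
theorem factorCheck_true_iff (num : Int) :
    factorCheck num = true ↔
      ((11:Int) ∣ num ∧ (12:Int) ∣ num ∧ (13:Int) ∣ num ∧ (14:Int) ∣ num ∧ (15:Int) ∣ num ∧
       (16:Int) ∣ num ∧ (17:Int) ∣ num ∧ (18:Int) ∣ num ∧ (19:Int) ∣ num ∧ (20:Int) ∣ num) := by
  simp only [factorCheck, factorCheckLoop, PySem.Int.mod_eq_zero_iff_dvd]
  by_cases h11 : (11:Int) ∣ num <;> by_cases h12 : (12:Int) ∣ num <;>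
  by_cases h13 : (13:Int) ∣ num <;> by_cases h14 : (14:Int) ∣ num <;>
  by_cases h15 : (15:Int) ∣ num <;> by_cases h16 : (16:Int) ∣ num <;>
  by_cases h17 : (17:Int) ∣ num <;> by_cases h18 : (18:Int) ∣ num <;>
  by_cases h19 : (19:Int) ∣ num <;> by_cases h20 : (20:Int) ∣ num <;>
  simp [h11, h12, h13, h14, h15, h16, h17, h18, h19, h20]

theorem coprime_mul_dvd {a b num : Int} (h : Int.gcd a b = 1)
    (ha : a ∣ num) (hb : b ∣ num) : a * b ∣ num :=
  (Int.isCoprime_iff_gcd_eq_one.mpr h).mul_dvd ha hb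

theorem lcm20_dvd_iff (num : Int) :
    (232792560:Int) ∣ num ↔
      ((11:Int) ∣ num ∧ (12:Int) ∣ num ∧ (13:Int) ∣ num ∧ (14:Int) ∣ num ∧ (15:Int) ∣ num ∧
       (16:Int) ∣ num ∧ (17:Int) ∣ num ∧ (18:Int) ∣ num ∧ (19:Int) ∣ num ∧ (20:Int) ∣ num) := by
  constructor
  · intro h
    refine ⟨?_, ?_, ?_, ?_, ?_, ?_, ?_, ?_, ?_, ?_⟩ <;>
      exact dvd_trans (by decide) h
  · rintro ⟨h11, _, h13, h14, h15, h16, h17, h18, h19, _⟩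
    have h9 : (9:Int) ∣ num := dvd_trans (by decide) h18
    have h5 : (5:Int) ∣ num := dvd_trans (by decide) h15
    have h7 : (7:Int) ∣ num := dvd_trans (by decide) h14
    have h144 : (144:Int) ∣ num := coprime_mul_dvd (by decide) h16 h9
    have h720 : (720:Int) ∣ num := coprime_mul_dvd (by decide) h144 h5
    have h5040 : (5040:Int) ∣ num := coprime_mul_dvd (by decide) h720 h7
    have h55440 : (55440:Int) ∣ num := coprime_mul_dvd (by decide) h5040 h11
    have h720720 : (720720:Int) ∣ num := coprime_mul_dvd (by decide) h55440 h13
    have h12252240 : (12252240:Int) ∣ num := coprime_mul_dvd (by decide) h720720 h17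
    exact coprime_mul_dvd (by decide) h12252240 h19

-- ===== VERDICT (by name: the statement is the Claim_ definition above) =====
theorem factorCheck_spec : Claim_equal_factorCheck := by
  intro num _
  unfold Spec_factorCheck
  have hB : factorCheck_alt num = true ↔ (232792560:Int) ∣ num := by
    simp [factorCheck_alt]
  exact Bool.eq_iff_iff.mpr (by rw [factorCheck_true_iff, hB, lcm20_dvd_iff])
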